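-- pv_equiv track=rewrite | github.com/antremis/ImCrypt | Transforms.py | spacialTransform
-- ===== SOURCE A (Python) =====
-- import copy
--
-- def spacialTransform(img, filter):
--     enc_image = copy.deepcopy(img)
--
--     height = len(img)
--     width = len(img[0])
--     r = (height%len(filter))//2
--     while(r+len(filter) < len(img)):
--         c = (width%len(filter[0]))//2
--         while(c+len(filter[0]) < len(img[0])):
--             for i in range(len(filter)):
--                 for j in range(len(filter[0])):
--                     enc_image[r+i][c+j] = img[r+filter[i][j]//len(filter)][c+(filter[i][j]%len(filter[0]))]
--             c+=len(filter[0])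
--         r+=len(filter)
--
--     return enc_image
-- ===== SOURCE B (Python) =====
-- def spacialTransform(img, filter):
--     # Inverse-map construction: build each output row afresh, computing for every
--     # destination pixel which source pixel it shows (closed-form block arithmetic),
--     # instead of iterating over blocks and writing into a mutable copy.
--     fh = len(filter)
--     h = len(img)
--     r0 = (h % fh) // 2
--     out = []
--     for R in range(h):
--         i = (R - r0) % fh
--         r = R - i
--         if R >= r0 and r + fh < h:
--             # this row lies inside a processed block band
--             fw = len(filter[0])
--             w = len(img[0])
--             c0 = (w % fw) // 2
--             row = []
--             for C in range(len(img[R])):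
--                 if C >= c0:
--                     j = (C - c0) % fw
--                     c = C - j
--                     if c + fw < w:
--                         v = filter[i][j]
--                         row.append(img[r + v // fh][c + v % fw])
--                         continue
--                 row.append(img[R][C])
--             out.append(row)
--         else:
--             out.append(list(img[R]))
--     return out
-- ===== Notes on version B (the rewrite author's own statement) =====
-- stated objective: alternative
-- what changed: A mutates a deepcopy in place by iterating over block origins and writing filter-permuted pixels block by block; B never iterates over blocks: it rebuilds the image pixel by pixel, computing for each destination coordinate in closed form (via floor-div/mod block arithmetic) which source pixel it shows, with no mutation.
import Mathlib
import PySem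

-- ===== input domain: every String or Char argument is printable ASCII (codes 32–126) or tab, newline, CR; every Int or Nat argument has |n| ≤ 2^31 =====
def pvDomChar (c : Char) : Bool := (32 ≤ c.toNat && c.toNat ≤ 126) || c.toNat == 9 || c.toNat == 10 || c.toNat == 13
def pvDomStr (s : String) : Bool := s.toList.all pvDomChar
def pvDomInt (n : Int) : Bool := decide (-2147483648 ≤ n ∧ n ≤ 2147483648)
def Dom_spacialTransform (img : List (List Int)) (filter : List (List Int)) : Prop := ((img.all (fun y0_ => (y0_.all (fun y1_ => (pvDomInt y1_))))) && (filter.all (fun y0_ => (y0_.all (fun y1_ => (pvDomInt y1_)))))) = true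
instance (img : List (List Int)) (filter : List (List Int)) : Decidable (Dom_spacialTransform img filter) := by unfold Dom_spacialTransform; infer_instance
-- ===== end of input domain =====

-- B replaces A's destructive block-by-block loop nest by an inverse-map construction: each output
-- pixel computes in closed form which source pixel it shows, and the image is rebuilt pixel by pixel
-- with no mutation and no iteration over blocks (objective: alternative; same return value).

-- ===== PORT A =====
def spacialTransform (img : List (List Int)) (filter : List (List Int)) : List (List Int) :=
  let h : Int := img.length
  let w : Int := (img.headD []).length
  let fh : Int := filter.length
  let fw : Int := (filter.headD []).length
  -- totality guard only: Python raises (ZeroDivisionError) before these divisors are used when 0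
  if fh ≤ 0 ∨ fw ≤ 0 then img else
  -- while r+fh < h step fh  ⇔  r ∈ range(r0, h-fh, fh); same for c
  (PySem.List.pyRange (PySem.Int.floordiv (PySem.Int.mod h fh) 2) (h - fh) fh).foldl (fun enc r =>
    (PySem.List.pyRange (PySem.Int.floordiv (PySem.Int.mod w fw) 2) (w - fw) fw).foldl (fun enc c =>
      (PySem.List.pyRange 0 fh 1).foldl (fun enc i =>
        (PySem.List.pyRange 0 fw 1).foldl (fun enc j =>
          let v := PySem.List.pyGetD (PySem.List.pyGetD filter i []) j 0
          -- enc_image[r+i][c+j] = img[...][...]  (pySetD/pyGetD are Python's xs[i]=v / xs[i])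
          PySem.List.pySetD enc (r + i)
            (PySem.List.pySetD (PySem.List.pyGetD enc (r + i) []) (c + j)
              (PySem.List.pyGetD (PySem.List.pyGetD img (r + PySem.Int.floordiv v fh) [])
                (c + PySem.Int.mod v fw) 0))) enc) enc) enc) img

-- ===== PORT B =====
def spacialTransform_alt (img : List (List Int)) (filter : List (List Int)) : List (List Int) :=
  let fh : Int := filter.length
  let h : Int := img.length
  -- totality guard only (Python raises ZeroDivisionError here before producing anything)
  if fh ≤ 0 then img else
  let r0 : Int := PySem.Int.floordiv (PySem.Int.mod h fh) 2
  (PySem.List.pyRange 0 h 1).map (fun R =>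
    let i := PySem.Int.mod (R - r0) fh
    let r := R - i
    let curRow := PySem.List.pyGetD img R []
    if r0 ≤ R ∧ r + fh < h then
      -- this row lies inside a processed block band
      let fw : Int := (filter.headD []).length
      -- totality guard only (Python raises ZeroDivisionError here before producing anything)
      if fw ≤ 0 then curRow else
      let w : Int := (img.headD []).length
      let c0 : Int := PySem.Int.floordiv (PySem.Int.mod w fw) 2
      (PySem.List.pyRange 0 (curRow.length : Int) 1).map (fun C =>
        if c0 ≤ C then
          let j := PySem.Int.mod (C - c0) fw
          let c := C - j
          if c + fw < w then
            let v := PySem.List.pyGetD (PySem.List.pyGetD filter i []) j 0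
            PySem.List.pyGetD (PySem.List.pyGetD img (r + PySem.Int.floordiv v fh) [])
              (c + PySem.Int.mod v fw) 0
          else PySem.List.pyGetD curRow C 0
        else PySem.List.pyGetD curRow C 0)
    else curRow)

-- ===== PRECONDITION & SPEC =====
-- Pre_ = exactly the inputs where Python A returns: img and filter nonempty, and — whenever the
-- outer block loop runs — filter[0] nonempty and every index A touches is in Python range.
def Pre_spacialTransform (img : List (List Int)) (filter : List (List Int)) : Prop :=
  img ≠ [] ∧ filter ≠ [] ∧
  (PySem.Int.floordiv (PySem.Int.mod (img.length : Int) (filter.length : Int)) 2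
      < (img.length : Int) - (filter.length : Int) →
    (filter.headD []) ≠ [] ∧
    (∀ r ∈ PySem.List.pyRange
        (PySem.Int.floordiv (PySem.Int.mod (img.length : Int) (filter.length : Int)) 2)
        ((img.length : Int) - (filter.length : Int)) (filter.length : Int),
     ∀ c ∈ PySem.List.pyRange
        (PySem.Int.floordiv (PySem.Int.mod ((img.headD []).length : Int) ((filter.headD []).length : Int)) 2)
        (((img.headD []).length : Int) - ((filter.headD []).length : Int)) ((filter.headD []).length : Int),
     ∀ i ∈ PySem.List.pyRange 0 (filter.length : Int) 1,
     ∀ j ∈ PySem.List.pyRange 0 ((filter.headD []).length : Int) 1,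
       PySem.Raise.InRange (PySem.List.pyGetD filter i []).length j ∧
       PySem.Raise.InRange img.length
         (r + PySem.Int.floordiv (PySem.List.pyGetD (PySem.List.pyGetD filter i []) j 0) (filter.length : Int)) ∧
       c + PySem.Int.mod (PySem.List.pyGetD (PySem.List.pyGetD filter i []) j 0) ((filter.headD []).length : Int)
         < ((PySem.List.pyGetD img
             (r + PySem.Int.floordiv (PySem.List.pyGetD (PySem.List.pyGetD filter i []) j 0) (filter.length : Int)) []).length : Int) ∧
       c + j < ((PySem.List.pyGetD img (r + i) []).length : Int)))
instance (img : List (List Int)) (filter : List (List Int)) : Decidable (Pre_spacialTransform img filter) := by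
  unfold Pre_spacialTransform; infer_instance

def pvWitness_spacialTransform : List (List Int) × List (List Int) := ([[1, 2], [3, 4]], [[0]])

def Spec_spacialTransform (img : List (List Int)) (filter : List (List Int)) (out : List (List Int)) : Prop := out = spacialTransform_alt img filter
instance (img : List (List Int)) (filter : List (List Int)) (out : List (List Int)) : Decidable (Spec_spacialTransform img filter out) := by unfold Spec_spacialTransform; infer_instance

-- ===== CLAIM (what is proved, stated in full; the proofs are below) =====
def Claim_equal_spacialTransform : Prop := ∀ (img : List (List Int)) (filter : List (List Int)), Dom_spacialTransform img filter → Pre_spacialTransform img filter → Spec_spacialTransform img filter (spacialTransform img filter)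

-- ===== LEMMAS AND PROOFS =====

-- Nat-indexed write, its fold, and the flat write list of A's loop nest (proof-side only)
def pvWrite (e : List (List Int)) (R C : Nat) (v : Int) : List (List Int) :=
  e.set R ((e.getD R []).set C v)

def pvApw (e : List (List Int)) (ws : List (Nat × Nat × Int)) : List (List Int) :=
  ws.foldl (fun e q => pvWrite e q.1 q.2.1 q.2.2) e

def pvWs (rL cL iL jL : List Int) (val : Int → Int → Int → Int → Int) : List (Nat × Nat × Int) :=
  rL.flatMap (fun r => cL.flatMap (fun c => iL.flatMap (fun i =>
    jL.map (fun j => ((r + i).toNat, (c + j).toNat, val r c i j)))))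

theorem pv_foldl_flatMap {α β γ : Type} (g : α → List β) (f : γ → β → γ) (l : List α) (init : γ) :
    (l.flatMap g).foldl f init = l.foldl (fun acc x => (g x).foldl f acc) init := by
  induction l generalizing init with
  | nil => rfl
  | cons x xs ih => simp [List.flatMap_cons, List.foldl_append, ih]

theorem pv_getD_pwrite (e : List (List Int)) (n R C : Nat) (v : Int) :
    (pvWrite e n C v).getD R [] = if n = R ∧ n < e.length then (e.getD n []).set C v else e.getD R [] := by
  unfold pvWrite
  by_cases h1 : n = R
  · subst h1
    by_cases h2 : n < e.length
    · simp [List.getD_eq_getElem?_getD, h2]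
    · rw [List.set_eq_of_length_le (by omega), if_neg (by tauto)]
  · simp [List.getD_eq_getElem?_getD, List.getElem?_set_ne h1, h1]

theorem pv_length_apw (ws : List (Nat × Nat × Int)) (e : List (List Int)) :
    (pvApw e ws).length = e.length := by
  induction ws generalizing e with
  | nil => rfl
  | cons q t ih => simp [pvApw, List.foldl_cons] at ih ⊢; rw [ih]; simp [pvWrite]

theorem pv_rowlen_apw (ws : List (Nat × Nat × Int)) (e : List (List Int)) (R : Nat) :
    ((pvApw e ws).getD R []).length = (e.getD R []).length := by
  induction ws generalizing e with
  | nil => rfl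
  | cons q t ih =>
    show ((pvApw (pvWrite e q.1 q.2.1 q.2.2) t).getD R []).length = _
    rw [ih, pv_getD_pwrite]
    split_ifs with h
    · rw [List.length_set, h.1]
    · rfl

theorem pv_get2_pwrite_ne (e : List (List Int)) (n c R C : Nat) (v : Int)
    (h : ¬(n = R ∧ c = C)) :
    ((pvWrite e n c v).getD R []).getD C 0 = (e.getD R []).getD C 0 := by
  rw [pv_getD_pwrite]
  split_ifs with h1
  · have hnR : n = R := h1.1
    have hcC : ¬ c = C := fun hc => h ⟨hnR, hc⟩
    subst hnR
    simp [List.getD_eq_getElem?_getD, List.getElem?_set_ne hcC]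
  · rfl

theorem pv_get2_pwrite_self (e : List (List Int)) (n c : Nat) (v : Int)
    (hn : n < e.length) (hc : c < (e.getD n []).length) :
    ((pvWrite e n c v).getD n []).getD c 0 = v := by
  rw [pv_getD_pwrite, if_pos ⟨rfl, hn⟩, List.getD_eq_getElem?_getD,
      List.getElem?_set_self hc]
  rfl

theorem pv_get2_apw_miss (ws : List (Nat × Nat × Int)) (e : List (List Int)) (R C : Nat)
    (h : ∀ q ∈ ws, ¬(q.1 = R ∧ q.2.1 = C)) :
    ((pvApw e ws).getD R []).getD C 0 = (e.getD R []).getD C 0 := by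
  induction ws generalizing e with
  | nil => rfl
  | cons q t ih =>
    show ((pvApw (pvWrite e q.1 q.2.1 q.2.2) t).getD R []).getD C 0 = _
    rw [ih _ (fun p hp => h p (List.mem_cons_of_mem _ hp)),
        pv_get2_pwrite_ne _ _ _ _ _ _ (h q (List.mem_cons_self))]

theorem pv_get2_apw_hit (ws : List (Nat × Nat × Int)) (e : List (List Int)) (R C : Nat) (v : Int)
    (hmem : (R, C, v) ∈ ws ∨ (e.getD R []).getD C 0 = v)
    (huniq : ∀ q ∈ ws, q.1 = R → q.2.1 = C → q.2.2 = v)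
    (hR : R < e.length) (hC : C < (e.getD R []).length) :
    ((pvApw e ws).getD R []).getD C 0 = v := by
  induction ws generalizing e with
  | nil => simpa [pvApw] using hmem.resolve_left (by simp)
  | cons q t ih =>
    show ((pvApw (pvWrite e q.1 q.2.1 q.2.2) t).getD R []).getD C 0 = v
    apply ih
    · rcases hmem with hm | hv
      · rcases List.mem_cons.mp hm with hq | ht
        · right
          have h1 : q.1 = R := by rw [← hq]
          have h2 : q.2.1 = C := by rw [← hq]
          have h3 : q.2.2 = v := by rw [← hq]
          rw [← h1, ← h2, ← h3]
          exact pv_get2_pwrite_self e q.1 q.2.1 q.2.2 (h1 ▸ hR) (by rw [h1, h2]; exact hC)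
        · left; exact ht
      · by_cases hd : q.1 = R ∧ q.2.1 = C
        · right
          obtain ⟨h1, h2⟩ := hd
          have hs := pv_get2_pwrite_self e q.1 q.2.1 q.2.2 (by rw [h1]; exact hR)
            (by rw [h1, h2]; exact hC)
          rw [← h1, ← h2]
          rw [hs]
          exact huniq q List.mem_cons_self h1 h2
        · right; rw [pv_get2_pwrite_ne _ _ _ _ _ _ hd]; exact hv
    · exact fun p hp => huniq p (List.mem_cons_of_mem _ hp)
    · rw [show pvWrite e q.1 q.2.1 q.2.2 = pvApw e [q] from rfl, pv_length_apw]; exact hR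
    · rw [show pvWrite e q.1 q.2.1 q.2.2 = pvApw e [q] from rfl, pv_rowlen_apw]; exact hC

theorem pv_pyWrite_eq_pvWrite (e : List (List Int)) (R C : Int) (v : Int)
    (hR : 0 ≤ R) (hC : 0 ≤ C) :
    PySem.List.pySetD e R (PySem.List.pySetD (PySem.List.pyGetD e R []) C v)
      = pvWrite e R.toNat C.toNat v := by
  rw [PySem.List.pySetD_of_nonneg _ _ hR, PySem.List.pySetD_of_nonneg _ _ hC,
      PySem.List.pyGetD_of_nonneg _ _ hR]
  rfl

-- A's four nested write loops are the fold of the flat write list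
theorem pv_foldl4_eq_apw (rL cL iL jL : List Int) (val : Int → Int → Int → Int → Int)
    (e : List (List Int))
    (hr : ∀ r ∈ rL, 0 ≤ r) (hc : ∀ c ∈ cL, 0 ≤ c)
    (hi : ∀ i ∈ iL, 0 ≤ i) (hj : ∀ j ∈ jL, 0 ≤ j) :
    rL.foldl (fun enc r => cL.foldl (fun enc c => iL.foldl (fun enc i => jL.foldl (fun enc j =>
        PySem.List.pySetD enc (r + i)
          (PySem.List.pySetD (PySem.List.pyGetD enc (r + i) []) (c + j) (val r c i j))) enc) enc) enc) e
      = pvApw e (pvWs rL cL iL jL val) := by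
  unfold pvApw pvWs
  simp only [pv_foldl_flatMap, List.foldl_map]
  refine PySem.List.foldl_congr_mem _ _ _ _ ?_
  intro a1 r hr1
  refine PySem.List.foldl_congr_mem _ _ _ _ ?_
  intro a2 c hc1
  refine PySem.List.foldl_congr_mem _ _ _ _ ?_
  intro a3 i hi1
  refine PySem.List.foldl_congr_mem _ _ _ _ ?_
  intro a4 j hj1
  exact pv_pyWrite_eq_pvWrite _ _ _ _
    (by have := hr r hr1; have := hi i hi1; omega)
    (by have := hc c hc1; have := hj j hj1; omega)

-- 1-D band arithmetic
theorem pv_emod_le (a b : Int) (h0 : 0 ≤ a) (hb : 0 < b) : a % b ≤ a := by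
  by_cases h : a < b
  · rw [Int.emod_eq_of_lt h0 h]
  · have := Int.emod_lt_of_pos a hb; omega

theorem pv_decomp_mod (b x0 x i : Int) (hb : 0 < b) (hdvd : b ∣ x - x0)
    (hi0 : 0 ≤ i) (hib : i < b) : PySem.Int.mod (x + i - x0) b = i := by
  rw [PySem.Int.mod_eq_emod_of_pos hb]
  obtain ⟨k, hk⟩ := hdvd
  have h1 : x + i - x0 = i + b * k := by omega
  rw [h1, Int.add_mul_emod_self_left, Int.emod_eq_of_lt hi0 hib]

-- forward: a write coordinate x+i determines (x, i) and implies B's band condition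
theorem pv_band_forward (L F X x i : Int) (hF : 0 < F)
    (hx : x ∈ PySem.List.pyRange (PySem.Int.floordiv (PySem.Int.mod L F) 2) (L - F) F)
    (hi : i ∈ PySem.List.pyRange 0 F 1) (hxi : x + i = X) :
    i = PySem.Int.mod (X - PySem.Int.floordiv (PySem.Int.mod L F) 2) F ∧
    PySem.Int.floordiv (PySem.Int.mod L F) 2 ≤ X ∧
    X - PySem.Int.mod (X - PySem.Int.floordiv (PySem.Int.mod L F) 2) F + F < L := by
  rw [PySem.List.mem_pyRange_iff_of_pos hF] at hx
  rw [PySem.List.mem_pyRange_one] at hi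
  obtain ⟨hx0, hxL, hdvd⟩ := hx
  subst hxi
  have hmod : PySem.Int.mod (x + i - PySem.Int.floordiv (PySem.Int.mod L F) 2) F = i :=
    pv_decomp_mod F (PySem.Int.floordiv (PySem.Int.mod L F) 2) x i hF hdvd hi.1 hi.2
  refine ⟨hmod.symm, by omega, by rw [hmod]; omega⟩

-- backward: B's band condition yields the block origin and offset with their memberships
theorem pv_band_backward (L F X : Int) (hF : 0 < F)
    (h1 : PySem.Int.floordiv (PySem.Int.mod L F) 2 ≤ X)
    (h2 : X - PySem.Int.mod (X - PySem.Int.floordiv (PySem.Int.mod L F) 2) F + F < L) :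
    (X - PySem.Int.mod (X - PySem.Int.floordiv (PySem.Int.mod L F) 2) F) ∈
      PySem.List.pyRange (PySem.Int.floordiv (PySem.Int.mod L F) 2) (L - F) F ∧
    (PySem.Int.mod (X - PySem.Int.floordiv (PySem.Int.mod L F) 2) F) ∈ PySem.List.pyRange 0 F 1 := by
  set x0 := PySem.Int.floordiv (PySem.Int.mod L F) 2 with hx0def
  rw [PySem.Int.mod_eq_emod_of_pos hF] at h2 ⊢
  rw [PySem.List.mem_pyRange_iff_of_pos hF, PySem.List.mem_pyRange_one]
  have ha : 0 ≤ X - x0 := by omega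
  have hm0 : 0 ≤ (X - x0) % F := Int.emod_nonneg _ (by omega)
  have hmF : (X - x0) % F < F := Int.emod_lt_of_pos _ hF
  have hle : (X - x0) % F ≤ X - x0 := pv_emod_le _ _ ha hF
  refine ⟨⟨by omega, by omega, ?_⟩, by omega⟩
  exact ⟨(X - x0) / F, by have := Int.emod_add_mul_ediv (X - x0) F; omega⟩

theorem pv_r0_nonneg (a b : Int) (hb : 0 < b) :
    0 ≤ PySem.Int.floordiv (PySem.Int.mod a b) 2 := by
  rw [PySem.Int.floordiv_eq_ediv_of_pos (by omega)]
  exact Int.ediv_nonneg (PySem.Int.mod_nonneg a hb) (by omega)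



-- value written by A at block (r,c), offset (i,j): img[r + filter[i][j]//fh][c + filter[i][j]%fw]
def pvVal (img filter : List (List Int)) (r c i j : Int) : Int :=
  PySem.List.pyGetD
    (PySem.List.pyGetD img
      (r + PySem.Int.floordiv (PySem.List.pyGetD (PySem.List.pyGetD filter i []) j 0)
        (filter.length : Int)) [])
    (c + PySem.Int.mod (PySem.List.pyGetD (PySem.List.pyGetD filter i []) j 0)
      ((filter.headD []).length : Int)) 0

-- the flat write list of a doubly-banded loop nest (rows L1/F1, cols L2/F2)
def pvWsR (L1 F1 L2 F2 : Int) (val : Int → Int → Int → Int → Int) : List (Nat × Nat × Int) :=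
  pvWs (PySem.List.pyRange (PySem.Int.floordiv (PySem.Int.mod L1 F1) 2) (L1 - F1) F1)
       (PySem.List.pyRange (PySem.Int.floordiv (PySem.Int.mod L2 F2) 2) (L2 - F2) F2)
       (PySem.List.pyRange 0 F1 1) (PySem.List.pyRange 0 F2 1) val

theorem pv_A_def (img filter : List (List Int)) :
    spacialTransform img filter =
      (if (filter.length : Int) ≤ 0 ∨ ((filter.headD []).length : Int) ≤ 0 then img else
        (PySem.List.pyRange (PySem.Int.floordiv (PySem.Int.mod (img.length : Int) (filter.length : Int)) 2)
            ((img.length : Int) - (filter.length : Int)) (filter.length : Int)).foldl (fun enc r =>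
          (PySem.List.pyRange (PySem.Int.floordiv (PySem.Int.mod ((img.headD []).length : Int) ((filter.headD []).length : Int)) 2)
              (((img.headD []).length : Int) - ((filter.headD []).length : Int)) ((filter.headD []).length : Int)).foldl (fun enc c =>
            (PySem.List.pyRange 0 (filter.length : Int) 1).foldl (fun enc i =>
              (PySem.List.pyRange 0 ((filter.headD []).length : Int) 1).foldl (fun enc j =>
                PySem.List.pySetD enc (r + i)
                  (PySem.List.pySetD (PySem.List.pyGetD enc (r + i) []) (c + j)
                    (pvVal img filter r c i j))) enc) enc) enc) img) := rfl

theorem pv_B_def (img filter : List (List Int)) :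
    spacialTransform_alt img filter =
      (if (filter.length : Int) ≤ 0 then img else
        (PySem.List.pyRange 0 (img.length : Int) 1).map (fun R =>
          if PySem.Int.floordiv (PySem.Int.mod (img.length : Int) (filter.length : Int)) 2 ≤ R ∧
             R - PySem.Int.mod (R - PySem.Int.floordiv (PySem.Int.mod (img.length : Int) (filter.length : Int)) 2) (filter.length : Int)
               + (filter.length : Int) < (img.length : Int) then
            (if ((filter.headD []).length : Int) ≤ 0 then PySem.List.pyGetD img R [] else
              (PySem.List.pyRange 0 ((PySem.List.pyGetD img R []).length : Int) 1).map (fun C =>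
                if PySem.Int.floordiv (PySem.Int.mod ((img.headD []).length : Int) ((filter.headD []).length : Int)) 2 ≤ C then
                  if C - PySem.Int.mod (C - PySem.Int.floordiv (PySem.Int.mod ((img.headD []).length : Int) ((filter.headD []).length : Int)) 2) ((filter.headD []).length : Int)
                       + ((filter.headD []).length : Int) < ((img.headD []).length : Int) then
                    pvVal img filter
                      (R - PySem.Int.mod (R - PySem.Int.floordiv (PySem.Int.mod (img.length : Int) (filter.length : Int)) 2) (filter.length : Int))
                      (C - PySem.Int.mod (C - PySem.Int.floordiv (PySem.Int.mod ((img.headD []).length : Int) ((filter.headD []).length : Int)) 2) ((filter.headD []).length : Int))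
                      (PySem.Int.mod (R - PySem.Int.floordiv (PySem.Int.mod (img.length : Int) (filter.length : Int)) 2) (filter.length : Int))
                      (PySem.Int.mod (C - PySem.Int.floordiv (PySem.Int.mod ((img.headD []).length : Int) ((filter.headD []).length : Int)) 2) ((filter.headD []).length : Int))
                  else PySem.List.pyGetD (PySem.List.pyGetD img R []) C 0
                else PySem.List.pyGetD (PySem.List.pyGetD img R []) C 0))
          else PySem.List.pyGetD img R [])) := rfl

-- every write destination of the loop nest satisfies B's band conditions, with the canonical value
theorem pv_wsR_dest (L1 F1 L2 F2 : Int) (val : Int → Int → Int → Int → Int)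
    (hF1 : 0 < F1) (hF2 : 0 < F2) (q : Nat × Nat × Int)
    (hq : q ∈ pvWsR L1 F1 L2 F2 val) (R C : Nat) (hR : q.1 = R) (hC : q.2.1 = C) :
    (PySem.Int.floordiv (PySem.Int.mod L1 F1) 2 ≤ (R : Int) ∧
      (R : Int) - PySem.Int.mod ((R : Int) - PySem.Int.floordiv (PySem.Int.mod L1 F1) 2) F1 + F1 < L1) ∧
    (PySem.Int.floordiv (PySem.Int.mod L2 F2) 2 ≤ (C : Int) ∧
      (C : Int) - PySem.Int.mod ((C : Int) - PySem.Int.floordiv (PySem.Int.mod L2 F2) 2) F2 + F2 < L2) ∧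
    q.2.2 = val ((R : Int) - PySem.Int.mod ((R : Int) - PySem.Int.floordiv (PySem.Int.mod L1 F1) 2) F1)
                ((C : Int) - PySem.Int.mod ((C : Int) - PySem.Int.floordiv (PySem.Int.mod L2 F2) 2) F2)
                (PySem.Int.mod ((R : Int) - PySem.Int.floordiv (PySem.Int.mod L1 F1) 2) F1)
                (PySem.Int.mod ((C : Int) - PySem.Int.floordiv (PySem.Int.mod L2 F2) 2) F2) := by
  simp only [pvWsR, pvWs, List.mem_flatMap, List.mem_map] at hq
  obtain ⟨r, hr, c, hc, i, hi, j, hj, hqe⟩ := hq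
  have hr0 : 0 ≤ r := by
    have := (PySem.List.mem_pyRange_iff_of_pos hF1 r).mp hr
    have := pv_r0_nonneg L1 F1 hF1; omega
  have hc0 : 0 ≤ c := by
    have := (PySem.List.mem_pyRange_iff_of_pos hF2 c).mp hc
    have := pv_r0_nonneg L2 F2 hF2; omega
  have hi0 : 0 ≤ i := (PySem.List.mem_pyRange_one.mp hi).1
  have hj0 : 0 ≤ j := (PySem.List.mem_pyRange_one.mp hj).1
  have hq1 : (r + i).toNat = R := by rw [← hR, ← hqe]
  have hq2 : (c + j).toNat = C := by rw [← hC, ← hqe]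
  have hri : r + i = (R : Int) := by omega
  have hcj : c + j = (C : Int) := by omega
  obtain ⟨hieq, hb1, hb2⟩ := pv_band_forward L1 F1 (R : Int) r i hF1 hr hi hri
  obtain ⟨hjeq, hb3, hb4⟩ := pv_band_forward L2 F2 (C : Int) c j hF2 hc hj hcj
  refine ⟨⟨hb1, hb2⟩, ⟨hb3, hb4⟩, ?_⟩
  have hq3 : q.2.2 = val r c i j := by rw [← hqe]
  rw [hq3, ← hieq, ← hjeq]
  congr 1 <;> omega

-- conversely, B's band conditions produce the corresponding write
theorem pv_wsR_mem (L1 F1 L2 F2 : Int) (val : Int → Int → Int → Int → Int)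
    (hF1 : 0 < F1) (hF2 : 0 < F2) (R C : Nat)
    (hb1 : PySem.Int.floordiv (PySem.Int.mod L1 F1) 2 ≤ (R : Int))
    (hb2 : (R : Int) - PySem.Int.mod ((R : Int) - PySem.Int.floordiv (PySem.Int.mod L1 F1) 2) F1 + F1 < L1)
    (hb3 : PySem.Int.floordiv (PySem.Int.mod L2 F2) 2 ≤ (C : Int))
    (hb4 : (C : Int) - PySem.Int.mod ((C : Int) - PySem.Int.floordiv (PySem.Int.mod L2 F2) 2) F2 + F2 < L2) :
    (R, C, val ((R : Int) - PySem.Int.mod ((R : Int) - PySem.Int.floordiv (PySem.Int.mod L1 F1) 2) F1)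
              ((C : Int) - PySem.Int.mod ((C : Int) - PySem.Int.floordiv (PySem.Int.mod L2 F2) 2) F2)
              (PySem.Int.mod ((R : Int) - PySem.Int.floordiv (PySem.Int.mod L1 F1) 2) F1)
              (PySem.Int.mod ((C : Int) - PySem.Int.floordiv (PySem.Int.mod L2 F2) 2) F2))
      ∈ pvWsR L1 F1 L2 F2 val := by
  obtain ⟨hxm, him⟩ := pv_band_backward L1 F1 (R : Int) hF1 hb1 hb2
  obtain ⟨hym, hjm⟩ := pv_band_backward L2 F2 (C : Int) hF2 hb3 hb4
  simp only [pvWsR, pvWs, List.mem_flatMap, List.mem_map]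
  refine ⟨_, hxm, _, hym, _, him, _, hjm, ?_⟩
  have h1 : (R : Int) - PySem.Int.mod ((R : Int) - PySem.Int.floordiv (PySem.Int.mod L1 F1) 2) F1
      + PySem.Int.mod ((R : Int) - PySem.Int.floordiv (PySem.Int.mod L1 F1) 2) F1 = (R : Int) := by ring
  have h2 : (C : Int) - PySem.Int.mod ((C : Int) - PySem.Int.floordiv (PySem.Int.mod L2 F2) 2) F2
      + PySem.Int.mod ((C : Int) - PySem.Int.floordiv (PySem.Int.mod L2 F2) 2) F2 = (C : Int) := by ring
  rw [h1, h2]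
  simp

theorem pv_A_eq_apw (img filter : List (List Int))
    (hFH : 0 < (filter.length : Int)) (hFW : 0 < ((filter.headD []).length : Int)) :
    spacialTransform img filter
      = pvApw img (pvWsR (img.length : Int) (filter.length : Int)
          ((img.headD []).length : Int) ((filter.headD []).length : Int) (pvVal img filter)) := by
  rw [pv_A_def, if_neg (by omega)]
  refine pv_foldl4_eq_apw _ _ _ _ _ _ ?_ ?_ ?_ ?_
  · intro r hr
    have := (PySem.List.mem_pyRange_iff_of_pos hFH r).mp hr
    have := pv_r0_nonneg (img.length : Int) _ hFH; omega
  · intro c hc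
    have := (PySem.List.mem_pyRange_iff_of_pos hFW c).mp hc
    have := pv_r0_nonneg ((img.headD []).length : Int) _ hFW; omega
  · intro i hi; exact (PySem.List.mem_pyRange_one.mp hi).1
  · intro j hj; exact (PySem.List.mem_pyRange_one.mp hj).1

-- ===== VERDICT (by name: the statement is the Claim_ definition above) =====
theorem pv_opt (l : List (List Int)) (R : Nat) (h : R < l.length) : l[R]? = some (l.getD R []) := by
  rw [List.getElem?_eq_getElem h, List.getD_eq_getElem l [] h]

theorem pv_opt0 (l : List Int) (C : Nat) (h : C < l.length) : l[C]? = some (l.getD C 0) := by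
  rw [List.getElem?_eq_getElem h, List.getD_eq_getElem l 0 h]

theorem spacialTransform_spec : Claim_equal_spacialTransform := by
  intro img filter _ hPre
  obtain ⟨himg, hfil, hcond⟩ := hPre
  unfold Spec_spacialTransform
  have hHn : 0 < img.length := List.length_pos_of_ne_nil himg
  have hFHn : 0 < filter.length := List.length_pos_of_ne_nil hfil
  have hFH : (0:Int) < (filter.length : Int) := by exact_mod_cast hFHn
  by_cases hband : PySem.Int.floordiv (PySem.Int.mod (img.length : Int) (filter.length : Int)) 2
      < (img.length : Int) - (filter.length : Int)
  · -- at least one block band is processed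
    obtain ⟨hf0, hidx⟩ := hcond hband
    have hFWn : 0 < (filter.headD []).length := List.length_pos_of_ne_nil hf0
    have hFW : (0:Int) < ((filter.headD []).length : Int) := by exact_mod_cast hFWn
    rw [pv_A_eq_apw img filter hFH hFW, pv_B_def, if_neg (by omega)]
    apply List.ext_getElem?
    intro R
    by_cases hRimg : R < img.length
    · rw [pv_opt _ _ (by rw [pv_length_apw]; exact hRimg), List.getElem?_map,
          PySem.List.getElem?_pyRange_one, if_pos (by omega), Option.map_some, zero_add]
      refine congrArg some ?_
      by_cases hrow : PySem.Int.floordiv (PySem.Int.mod (img.length : Int) (filter.length : Int)) 2 ≤ (R : Int) ∧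
          (R : Int) - PySem.Int.mod ((R : Int) - PySem.Int.floordiv (PySem.Int.mod (img.length : Int) (filter.length : Int)) 2) (filter.length : Int)
            + (filter.length : Int) < (img.length : Int)
      · rw [if_pos hrow, if_neg (by omega)]
        apply List.ext_getElem?
        intro C
        by_cases hCimg : C < (img.getD R []).length
        · rw [pv_opt0 _ _ (by rw [pv_rowlen_apw]; exact hCimg), List.getElem?_map,
              PySem.List.getElem?_pyRange_one, if_pos (by rw [PySem.List.pyGetD_natCast]; omega),
              Option.map_some, zero_add]
          refine congrArg some ?_
          by_cases hcol1 : PySem.Int.floordiv (PySem.Int.mod ((img.headD []).length : Int) ((filter.headD []).length : Int)) 2 ≤ (C : Int)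
          · by_cases hcol2 : (C : Int) - PySem.Int.mod ((C : Int) - PySem.Int.floordiv (PySem.Int.mod ((img.headD []).length : Int) ((filter.headD []).length : Int)) 2) ((filter.headD []).length : Int)
                + ((filter.headD []).length : Int) < ((img.headD []).length : Int)
            · rw [if_pos hcol1, if_pos hcol2]
              refine pv_get2_apw_hit _ _ _ _ _ (Or.inl ?_) ?_ hRimg hCimg
              · exact pv_wsR_mem _ _ _ _ _ hFH hFW R C hrow.1 hrow.2 hcol1 hcol2
              · intro q hq hq1 hq2
                exact (pv_wsR_dest _ _ _ _ _ hFH hFW q hq R C hq1 hq2).2.2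
            · rw [if_pos hcol1, if_neg hcol2, pv_get2_apw_miss _ _ _ _ ?_]
              · simp
              · intro q hq hd
                exact hcol2 (pv_wsR_dest _ _ _ _ _ hFH hFW q hq R C hd.1 hd.2).2.1.2
          · rw [if_neg hcol1, pv_get2_apw_miss _ _ _ _ ?_]
            · simp
            · intro q hq hd
              exact hcol1 (pv_wsR_dest _ _ _ _ _ hFH hFW q hq R C hd.1 hd.2).2.1.1
        · rw [List.getElem?_eq_none (by rw [pv_rowlen_apw]; omega),
              List.getElem?_eq_none
                (by rw [List.length_map, PySem.List.length_pyRange_one, PySem.List.pyGetD_natCast]; omega)]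
      · rw [if_neg hrow]
        apply List.ext_getElem?
        intro C
        by_cases hCimg : C < (img.getD R []).length
        · rw [pv_opt0 _ _ (by rw [pv_rowlen_apw]; exact hCimg),
              pv_get2_apw_miss _ _ _ _ ?_]
          · rw [PySem.List.pyGetD_natCast, pv_opt0 _ _ hCimg]
          · intro q hq hd
            exact hrow ⟨(pv_wsR_dest _ _ _ _ _ hFH hFW q hq R C hd.1 hd.2).1.1,
                        (pv_wsR_dest _ _ _ _ _ hFH hFW q hq R C hd.1 hd.2).1.2⟩
        · rw [List.getElem?_eq_none (by rw [pv_rowlen_apw]; omega),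
              List.getElem?_eq_none (by rw [PySem.List.pyGetD_natCast]; omega)]
    · rw [List.getElem?_eq_none (by rw [pv_length_apw]; omega),
          List.getElem?_eq_none (by simp [PySem.List.length_pyRange_one]; omega)]
  · -- no band is processed: both programs return the image unchanged
    have hA : spacialTransform img filter = img := by
      rw [pv_A_def]
      split_ifs with hg
      · rfl
      · rw [PySem.List.pyRange_of_pos _ _ hFH, if_neg hband]
        simp
    have hB : spacialTransform_alt img filter = img := by
      rw [pv_B_def, if_neg (by omega)]
      rw [List.map_congr_left (g := fun R => PySem.List.pyGetD img R []) ?_,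
          PySem.List.map_pyGetD_pyRange_zero']
      intro R hR
      rw [if_neg]
      rintro ⟨ha, hb⟩
      have h0 : 0 ≤ R - PySem.Int.floordiv (PySem.Int.mod (img.length : Int) (filter.length : Int)) 2 := by omega
      have h1 : 0 ≤ PySem.Int.mod (R - PySem.Int.floordiv (PySem.Int.mod (img.length : Int) (filter.length : Int)) 2) (filter.length : Int) :=
        PySem.Int.mod_nonneg _ hFH
      have h2 : PySem.Int.mod (R - PySem.Int.floordiv (PySem.Int.mod (img.length : Int) (filter.length : Int)) 2) (filter.length : Int)
          ≤ R - PySem.Int.floordiv (PySem.Int.mod (img.length : Int) (filter.length : Int)) 2 := by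
        rw [PySem.Int.mod_eq_emod_of_pos hFH]
        exact pv_emod_le _ _ h0 hFH
      omega
    rw [hA, hB]
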